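-- pv_equiv track=rewrite | github.com/Jahdie/Algorithms_And_Structures_Data | Lesson_4/Task_1.py | multiple_v2
-- ===== SOURCE A (Python) =====
-- def multiple_v2(max_item):
--     min_item = 2
--     min_divider = 2
--     max_divider = 10
--     multiple_dict = {}
--     for i in range(min_divider, max_divider):
--         multiples_count = 0
--         for j in range(min_item, max_item):
--             if j % i == 0:
--                 multiples_count += 1
--         multiple_dict.update({i: multiples_count})
--     return multiple_dict
-- ===== SOURCE B (Python) =====
-- def multiple_v2(max_item):
--     return {i: max(0, (max_item - 1) // i) for i in range(2, 10)}
-- ===== Notes on version B (the rewrite author's own statement) =====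
-- stated objective: faster
-- what changed: Replaces the O(max_item) inner counting loop per divisor with the closed-form count max(0, (max_item-1)//i) computed in a dict comprehension.
import Mathlib
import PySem

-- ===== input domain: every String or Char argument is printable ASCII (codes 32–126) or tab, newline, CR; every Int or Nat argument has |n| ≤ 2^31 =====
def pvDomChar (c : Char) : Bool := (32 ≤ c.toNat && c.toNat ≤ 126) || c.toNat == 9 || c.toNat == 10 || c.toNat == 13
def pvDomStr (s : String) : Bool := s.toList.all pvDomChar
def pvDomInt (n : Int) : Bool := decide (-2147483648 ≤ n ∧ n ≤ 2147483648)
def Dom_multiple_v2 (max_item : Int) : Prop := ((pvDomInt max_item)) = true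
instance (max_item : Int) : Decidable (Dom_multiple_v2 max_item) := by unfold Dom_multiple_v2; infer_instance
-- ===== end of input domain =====

-- B replaces A's O(max_item) counting loop per divisor with the closed form max(0, (max_item-1)//i): asymptotically faster.

-- ===== PORT A =====
-- literal port of A: for each i in range(2,10), count j in range(2,max_item) with j % i == 0, dict update
def multiple_v2 (max_item : Int) : List (Int × Int) :=
  ((PySem.List.pyRange 2 10 1).foldl
    (fun d i =>
      PySem.Dict.insert d i
        ((PySem.List.pyRange 2 max_item 1).foldl
          (fun c j => if PySem.Int.mod j i = 0 then c + 1 else c) 0))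
    (PySem.Dict.empty : PySem.Dict Int Int)).items

-- ===== PORT B =====
-- port of B's dict comprehension {i: max(0,(max_item-1)//i) for i in range(2,10)}: keys 2..9 are
-- pairwise distinct, so each insertion appends — ported as a map over the range (exact here).
def multiple_v2_alt (max_item : Int) : List (Int × Int) :=
  (PySem.List.pyRange 2 10 1).map
    (fun i => (i, max 0 (PySem.Int.floordiv (max_item - 1) i)))

-- ===== PRECONDITION & SPEC =====
def Spec_multiple_v2 (max_item : Int) (out : List (Int × Int)) : Prop := out = multiple_v2_alt max_item
instance (max_item : Int) (out : List (Int × Int)) : Decidable (Spec_multiple_v2 max_item out) := by unfold Spec_multiple_v2; infer_instance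

-- ===== CLAIM (what is proved, stated in full; the proofs are below) =====
def Claim_equal_multiple_v2 : Prop := ∀ (max_item : Int), Dom_multiple_v2 max_item → Spec_multiple_v2 max_item (multiple_v2 max_item)

-- ===== LEMMAS AND PROOFS =====

-- one more element in [1,b]: the multiple count of i grows by 1 exactly when i divides b
theorem floordiv_succ (i b : Int) (hi : 2 ≤ i) (_hb : 1 ≤ b) :
    PySem.Int.floordiv b i
      = PySem.Int.floordiv (b - 1) i + (if PySem.Int.mod b i = 0 then 1 else 0) := by
  have hq := (PySem.Int.floordiv_eq_iff_of_pos (a := b - 1) (b := i) (q := PySem.Int.floordiv (b - 1) i) (by omega)).mp rfl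
  set q : Int := PySem.Int.floordiv (b - 1) i with hqdef
  have hexp1 : (q + 1) * i = q * i + i := by ring
  rw [hexp1] at hq
  have hmod : PySem.Int.mod b i = 0 ↔ i ∣ b := PySem.Int.mod_eq_zero_iff_dvd b i
  by_cases hdv : i ∣ b
  · have h1 : PySem.Int.mod b i = 0 := hmod.mpr hdv
    obtain ⟨c, hc⟩ := hdv
    have hc' : b = c * i := by rw [hc]; ring
    have hcq : q < c := by
      by_contra hcc
      rw [not_lt] at hcc
      have : c * i ≤ q * i := mul_le_mul_of_nonneg_right hcc (by omega)
      omega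
    have h2 : (q + 1) * i ≤ c * i := mul_le_mul_of_nonneg_right (by omega) (by omega)
    rw [hexp1] at h2
    have h3 : PySem.Int.floordiv b i = q + 1 := by
      rw [PySem.Int.floordiv_eq_iff_of_pos (by omega)]
      have hexp2 : (q + 1 + 1) * i = q * i + i + i := by ring
      rw [hexp1, hexp2]
      omega
    simp [h3, h1]
  · have h1 : ¬ PySem.Int.mod b i = 0 := fun h => hdv (hmod.mp h)
    have h3 : PySem.Int.floordiv b i = q := by
      rw [PySem.Int.floordiv_eq_iff_of_pos (by omega), hexp1]
      refine ⟨by omega, ?_⟩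
      by_cases hbe : b = q * i + i
      · exact absurd ⟨q + 1, by rw [hbe]; ring⟩ hdv
      · omega
    simp [h3, h1]

-- the counting loop over range(2, 2+n) equals (n+1)//i for i ≥ 2
theorem count_aux (i : Int) (hi : 2 ≤ i) (n : Nat) :
    (PySem.List.pyRange 2 (2 + (n : Int)) 1).foldl
      (fun c j => if PySem.Int.mod j i = 0 then c + 1 else c) 0
    = PySem.Int.floordiv ((n : Int) + 1) i := by
  induction n with
  | zero =>
    have h1 : PySem.List.pyRange 2 (2 + ((0 : Nat) : Int)) 1 = [] :=
      PySem.List.pyRange_one_eq_nil (by simp)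
    have h2 : PySem.Int.floordiv (1 : Int) i = 0 := by
      rw [PySem.Int.floordiv_eq_iff_of_pos (by omega)]; omega
    rw [h1]
    simpa using h2.symm
  | succ k ih =>
    have hsplit : (2 : Int) + ((k + 1 : Nat) : Int) = (2 + (k : Int)) + 1 := by push_cast; ring
    rw [hsplit, PySem.List.pyRange_one_succ_right (by omega), List.foldl_append, ih]
    have hstep := floordiv_succ i ((k : Int) + 2) hi (by omega)
    have e1 : ((k + 1 : Nat) : Int) + 1 = (k : Int) + 2 := by push_cast; ring
    have e2 : (k : Int) + 2 - 1 = (k : Int) + 1 := by ring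
    rw [e1, hstep, e2]
    have e3 : (2 : Int) + (k : Int) = (k : Int) + 2 := by ring
    simp [List.foldl, e3]
    by_cases h : PySem.Int.mod ((k : Int) + 2) i = 0 <;> simp [h]

-- the inner counting loop over range(2, m) equals the closed form max(0, (m-1)//i), for i ≥ 2
theorem count_loop_eq (i : Int) (hi : 2 ≤ i) (m : Int) :
    (PySem.List.pyRange 2 m 1).foldl
      (fun c j => if PySem.Int.mod j i = 0 then c + 1 else c) 0
    = max 0 (PySem.Int.floordiv (m - 1) i) := by
  by_cases hm : m ≤ 2
  · rw [PySem.List.pyRange_one_eq_nil hm]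
    have : PySem.Int.floordiv (m - 1) i < 1 := by
      rw [PySem.Int.floordiv_lt_iff_lt_mul (by omega)]; omega
    simp [List.foldl]; omega
  · obtain ⟨n, hn⟩ : ∃ n : Nat, m = 2 + (n : Int) := ⟨(m - 2).toNat, by omega⟩
    subst hn
    rw [count_aux i hi n]
    have h0 : 0 ≤ PySem.Int.floordiv ((n : Int) + 1) i := by
      rw [PySem.Int.le_floordiv_iff_mul_le (by omega)]; omega
    have e : (2 : Int) + (n : Int) - 1 = (n : Int) + 1 := by ring
    rw [e]; omega

theorem multiple_v2_spec : Claim_equal_multiple_v2 := by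
  intro m _
  unfold Spec_multiple_v2 multiple_v2 multiple_v2_alt
  have hr : PySem.List.pyRange 2 10 1 = [2,3,4,5,6,7,8,9] := by decide
  rw [hr]
  simp only [List.foldl, List.map]
  rw [count_loop_eq 2 (by norm_num) m, count_loop_eq 3 (by norm_num) m,
      count_loop_eq 4 (by norm_num) m, count_loop_eq 5 (by norm_num) m,
      count_loop_eq 6 (by norm_num) m, count_loop_eq 7 (by norm_num) m,
      count_loop_eq 8 (by norm_num) m, count_loop_eq 9 (by norm_num) m]
  simp [PySem.Dict.insert, PySem.Dict.empty]
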